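-- pv_equiv track=rewrite | github.com/DhanashreePetare/cpcais | watermark_utils.py | _encode_hidden_payload
-- ===== SOURCE A (Python) =====
-- _ZW_BIT_0 = "\u200b"
--
-- _ZW_BIT_1 = "\u200c"
--
-- _ZW_START = "\u200b\u200b\u200b\u200b"
--
-- _ZW_END = "\u200c\u200c\u200c\u200c"
--
-- def _encode_hidden_payload(payload):
--     payload_text = str(payload or '').strip()
--     if not payload_text:
--         return ''
--     payload_bytes = payload_text.encode('utf-8')
--     bit_string = ''.join(f"{byte:08b}" for byte in payload_bytes)
--     encoded_bits = ''.join(_ZW_BIT_1 if bit == '1' else _ZW_BIT_0 for bit in bit_string)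
--     return f"{_ZW_START}{encoded_bits}{_ZW_END}"
-- ===== SOURCE B (Python) =====
-- _ZW_BIT_0 = "\u200b"
--
-- _ZW_BIT_1 = "\u200c"
--
-- _ZW_START = "\u200b\u200b\u200b\u200b"
--
-- _ZW_END = "\u200c\u200c\u200c\u200c"
--
-- _ZW_TABLE = str.maketrans("01", _ZW_BIT_0 + _ZW_BIT_1)
--
-- def _encode_hidden_payload(payload):
--     payload_text = str(payload or '').strip()
--     if not payload_text:
--         return ''
--     payload_bytes = payload_text.encode('utf-8')
--     value = int.from_bytes(payload_bytes, 'big')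
--     bits = format(value, '0{}b'.format(8 * len(payload_bytes)))
--     return _ZW_START + bits.translate(_ZW_TABLE) + _ZW_END
-- ===== Notes on version B (the rewrite author's own statement) =====
-- stated objective: faster
-- what changed: The per-byte f-string bit loop and per-bit conditional join are replaced by a single big-integer conversion (int.from_bytes) formatted as one zero-padded binary string and mapped to zero-width chars by str.translate with a table.
import Mathlib
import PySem

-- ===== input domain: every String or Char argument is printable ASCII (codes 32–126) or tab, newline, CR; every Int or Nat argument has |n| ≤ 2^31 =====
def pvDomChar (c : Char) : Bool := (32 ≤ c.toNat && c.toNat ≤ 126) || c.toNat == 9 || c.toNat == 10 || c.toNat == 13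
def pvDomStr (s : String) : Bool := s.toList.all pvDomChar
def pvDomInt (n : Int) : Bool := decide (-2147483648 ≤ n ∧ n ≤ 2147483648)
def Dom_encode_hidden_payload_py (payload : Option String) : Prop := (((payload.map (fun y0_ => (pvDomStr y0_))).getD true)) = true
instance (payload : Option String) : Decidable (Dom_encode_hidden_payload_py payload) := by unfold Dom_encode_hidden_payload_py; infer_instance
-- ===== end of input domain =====

-- B replaces A's per-byte f-string bit loop by one big-integer conversion (int.from_bytes)
-- plus a zero-padded binary format and a translation table (objective: alternative decomposition).

-- ===== PORT A =====
-- module constants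
def pvZW0 : Char := Char.ofNat 0x200B   -- _ZW_BIT_0
def pvZW1 : Char := Char.ofNat 0x200C   -- _ZW_BIT_1
def pvZWStart : List Char := [pvZW0, pvZW0, pvZW0, pvZW0]   -- _ZW_START
def pvZWEnd : List Char := [pvZW1, pvZW1, pvZW1, pvZW1]     -- _ZW_END

-- f"{byte:08b}": the eight binary digits of the byte, msb first (hand port, exact for byte < 256)
def pvBitChar (n : Nat) : Char := if n % 2 == 1 then '1' else '0'
def pvFmt08b (b : Nat) : List Char :=
  [pvBitChar (b / 128), pvBitChar (b / 64), pvBitChar (b / 32), pvBitChar (b / 16),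
   pvBitChar (b / 8), pvBitChar (b / 4), pvBitChar (b / 2), pvBitChar b]

def encode_hidden_payload_py (payload : Option String) : String :=
  let payload_text : List Char := PySem.Chars.strip (payload.getD "").toList
  if payload_text.isEmpty then "" else
    -- payload_text.encode('utf-8'): one byte per char, exact on the ASCII domain Dom
    let payload_bytes : List Nat := payload_text.map (fun c => c.toNat)
    let bit_string : List Char := (payload_bytes.map pvFmt08b).flatten
    let encoded_bits : List Char := bit_string.map (fun bit => if bit == '1' then pvZW1 else pvZW0)
    String.ofList (pvZWStart ++ encoded_bits ++ pvZWEnd)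

-- ===== PORT B =====
-- int.from_bytes(bs, 'big')
def pvFromBytes (bs : List Nat) : Nat := bs.foldl (fun acc b => acc * 256 + b) 0
-- format(v, '0{w}b'): the w binary digits of v, msb first (hand port, exact for v < 2^w)
def pvPadBin (v : Nat) : Nat → List Char
  | 0 => []
  | w + 1 => pvPadBin (v / 2) w ++ [if v % 2 == 1 then '1' else '0']
-- str.maketrans("01", _ZW_BIT_0 + _ZW_BIT_1) applied by translate
def pvTranslate (c : Char) : Char := if c == '0' then pvZW0 else if c == '1' then pvZW1 else c

def encode_hidden_payload_py_alt (payload : Option String) : String :=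
  let payload_text : List Char := PySem.Chars.strip (payload.getD "").toList
  if payload_text.isEmpty then "" else
    -- payload_text.encode('utf-8'): one byte per char, exact on the ASCII domain Dom
    let payload_bytes : List Nat := payload_text.map (fun c => c.toNat)
    let bits : List Char := pvPadBin (pvFromBytes payload_bytes) (8 * payload_bytes.length)
    String.ofList (pvZWStart ++ bits.map pvTranslate ++ pvZWEnd)

-- ===== PRECONDITION & SPEC =====
def Spec_encode_hidden_payload_py (payload : Option String) (out : String) : Prop := out = encode_hidden_payload_py_alt payload
instance (payload : Option String) (out : String) : Decidable (Spec_encode_hidden_payload_py payload out) := by unfold Spec_encode_hidden_payload_py; infer_instance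

-- ===== CLAIM (what is proved, stated in full; the proofs are below) =====
def Claim_equal_encode_hidden_payload_py : Prop := ∀ (payload : Option String), Dom_encode_hidden_payload_py payload → Spec_encode_hidden_payload_py payload (encode_hidden_payload_py payload)

-- ===== LEMMAS AND PROOFS =====

-- splitting a zero-padded binary rendering at a byte boundary
lemma pv_pad_split (k : Nat) : ∀ (r v w : Nat), r < 2 ^ k →
    pvPadBin (v * 2 ^ k + r) (w + k) = pvPadBin v w ++ pvPadBin r k := by
  induction k with
  | zero =>
      intro r v w hr
      interval_cases r
      simp [pvPadBin]
  | succ k ih =>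
      intro r v w hr
      have hx : v * 2 ^ (k + 1) + r = v * 2 ^ k * 2 + r := by ring
      have hdiv : (v * 2 ^ k * 2 + r) / 2 = v * 2 ^ k + r / 2 := by omega
      have hmod : (v * 2 ^ k * 2 + r) % 2 = r % 2 := by omega
      have hr2 : r / 2 < 2 ^ k := by
        have := Nat.pow_lt_pow_succ (by norm_num : 1 < 2) (n := k)
        omega
      show pvPadBin (v * 2 ^ (k + 1) + r) ((w + k) + 1) = _
      rw [pvPadBin, hx, hdiv, hmod, ih (r / 2) v w hr2, pvPadBin]
      simp

lemma pv_fmt_eq_pad (b : Nat) : pvFmt08b b = pvPadBin b 8 := by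
  simp [pvFmt08b, pvPadBin, pvBitChar, Nat.div_div_eq_div_mul]

lemma pv_flatten_eq_pad (bs : List Nat) (h : ∀ b ∈ bs, b < 256) :
    (bs.map pvFmt08b).flatten = pvPadBin (pvFromBytes bs) (8 * bs.length) := by
  induction bs using List.reverseRecOn with
  | nil => simp [pvFromBytes, pvPadBin]
  | append_singleton bs b ih =>
      have hb : b < 256 := h b (by simp)
      have hlen : 8 * (bs ++ [b]).length = 8 * bs.length + 8 := by simp; ring
      have hfb : pvFromBytes (bs ++ [b]) = pvFromBytes bs * 2 ^ 8 + b := by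
        simp [pvFromBytes, List.foldl_append]
      rw [hlen, hfb, pv_pad_split 8 b (pvFromBytes bs) (8 * bs.length) (by norm_num; omega),
        ← ih (fun x hx => h x (by simp [hx])), ← pv_fmt_eq_pad]
      simp

lemma pv_fmt_mem (b : Nat) (c : Char) (hc : c ∈ pvFmt08b b) : c = '0' ∨ c = '1' := by
  simp only [pvFmt08b, pvBitChar, List.mem_cons, List.not_mem_nil, or_false] at hc
  rcases hc with h | h | h | h | h | h | h | h <;> subst h <;> split <;> simp

lemma pv_mem_strip {c : Char} {l : List Char} (h : c ∈ PySem.Chars.strip l) : c ∈ l := by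
  simp only [PySem.Chars.strip, PySem.Chars.rstrip, PySem.Chars.lstrip, List.mem_reverse] at h
  exact (List.dropWhile_sublist _).mem ((List.mem_reverse).mp
    ((List.dropWhile_sublist _).mem h))

-- ===== VERDICT (by name: the statement is the Claim_ definition above) =====
theorem encode_hidden_payload_py_spec : Claim_equal_encode_hidden_payload_py := by
  intro payload hdom
  unfold Spec_encode_hidden_payload_py encode_hidden_payload_py encode_hidden_payload_py_alt
  set t := PySem.Chars.strip (payload.getD "").toList with ht
  by_cases he : t.isEmpty
  · simp [he]
  · simp only [he, if_neg, Bool.false_eq_true, not_false_eq_true]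
    -- every byte is < 256: Dom says every char of the payload is ASCII/whitespace
    have hchars : ∀ c ∈ (payload.getD "").toList, c.toNat < 256 := by
      intro c hc
      cases payload with
      | none => simp at hc
      | some s =>
          have : pvDomStr s = true := by
            simpa [Dom_encode_hidden_payload_py] using hdom
          have := (List.all_eq_true.mp this) c (by simpa using hc)
          simp only [pvDomChar, Bool.or_eq_true, Bool.and_eq_true, beq_iff_eq,
            decide_eq_true_eq] at this
          omega
    have hbytes : ∀ b ∈ t.map (fun c : Char => c.toNat), b < 256 := by
      intro b hb
      rcases List.mem_map.mp hb with ⟨c, hc, rfl⟩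
      exact hchars c (pv_mem_strip hc)
    -- the two bit strings coincide
    have hbits : ((t.map (fun c : Char => c.toNat)).map pvFmt08b).flatten =
        pvPadBin (pvFromBytes (t.map (fun c : Char => c.toNat)))
          (8 * (t.map (fun c : Char => c.toNat)).length) :=
      pv_flatten_eq_pad _ hbytes
    -- the two char maps coincide on '0'/'1' strings
    have hmap : ∀ c ∈ ((t.map (fun c : Char => c.toNat)).map pvFmt08b).flatten,
        (if c == '1' then pvZW1 else pvZW0) = pvTranslate c := by
      intro c hc
      rcases List.mem_flatten.mp hc with ⟨l, hl, hcl⟩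
      rcases List.mem_map.mp hl with ⟨b, _, rfl⟩
      rcases pv_fmt_mem b c hcl with rfl | rfl <;> simp [pvTranslate, pvZW0, pvZW1]
    rw [← hbits, List.map_congr_left hmap]
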